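-- pv_equiv track=rewrite | github.com/nucypher/nucypher | scripts/sampling/taco_sampling.py | find_node_in_bucket
-- ===== SOURCE A (Python) =====
-- def find_node_in_bucket(node):
--     buckets = {
--         "nuco": [0, 1, 2, 3, 4, 5, 6, 7, 8, 9],
--         "dao": [10, 11, 12, 13, 14, 15],
--         "provider1": [16, 17, 18, 19, 20],
--         "provider2": [21, 22, 23, 24, 25],
--         "provider3": [26, 27, 28, 29, 30],
--         "keep": [31, 32, 33, 34],
--         "adopter1": [35, 36],
--         "adopter2": [37, 38],
--     }
--     for bucket_name, bucket_nodes in buckets.items():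
--         if node in bucket_nodes:
--             return bucket_name
--     return "no_bucket"
-- ===== SOURCE B (Python) =====
-- def find_node_in_bucket(node):
--     # The buckets are contiguous ranges covering 0..38; locate node by its
--     # range start (descending threshold scan) instead of membership tests.
--     starts = [
--         (37, "adopter2"),
--         (35, "adopter1"),
--         (31, "keep"),
--         (26, "provider3"),
--         (21, "provider2"),
--         (16, "provider1"),
--         (10, "dao"),
--         (0, "nuco"),
--     ]
--     if 0 <= node <= 38:
--         for lo, name in starts:
--             if node >= lo:
--                 return name
--     return "no_bucket"
-- ===== Notes on version B (the rewrite author's own statement) =====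
-- stated objective: simpler
-- what changed: Replaces the per-bucket list-membership scan with a descending range-boundary lookup that exploits the buckets being contiguous integer ranges 0..38; no membership lists remain.
import Mathlib
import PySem

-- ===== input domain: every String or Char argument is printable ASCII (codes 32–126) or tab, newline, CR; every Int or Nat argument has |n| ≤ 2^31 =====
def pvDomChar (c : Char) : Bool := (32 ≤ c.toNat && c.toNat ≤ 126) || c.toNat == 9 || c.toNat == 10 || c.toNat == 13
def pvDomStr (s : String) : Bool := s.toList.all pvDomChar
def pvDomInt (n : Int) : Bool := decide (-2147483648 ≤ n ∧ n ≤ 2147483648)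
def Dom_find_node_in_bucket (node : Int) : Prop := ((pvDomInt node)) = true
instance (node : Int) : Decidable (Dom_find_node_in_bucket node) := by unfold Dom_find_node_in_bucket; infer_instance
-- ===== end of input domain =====

-- B replaces A's per-bucket membership scan with a descending range-boundary lookup (objective: simpler).


-- ===== PORT A =====
-- A: iterate over the dict's buckets in insertion order, return first name whose node list contains node.
def pvBucketsA : List (String × List Int) :=
  [("nuco", [0, 1, 2, 3, 4, 5, 6, 7, 8, 9]),
   ("dao", [10, 11, 12, 13, 14, 15]),
   ("provider1", [16, 17, 18, 19, 20]),
   ("provider2", [21, 22, 23, 24, 25]),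
   ("provider3", [26, 27, 28, 29, 30]),
   ("keep", [31, 32, 33, 34]),
   ("adopter1", [35, 36]),
   ("adopter2", [37, 38])]

def pvScanA (node : Int) : List (String × List Int) → String
  | [] => "no_bucket"
  | (name, ns) :: rest => if ns.contains node then name else pvScanA node rest

def find_node_in_bucket (node : Int) : String := pvScanA node pvBucketsA

-- ===== PORT B =====
def pvStartsB : List (Int × String) :=
  [(37, "adopter2"), (35, "adopter1"), (31, "keep"), (26, "provider3"),
   (21, "provider2"), (16, "provider1"), (10, "dao"), (0, "nuco")]

def pvScanB (node : Int) : List (Int × String) → String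
  | [] => "no_bucket"
  | (lo, name) :: rest => if lo ≤ node then name else pvScanB node rest

def find_node_in_bucket_alt (node : Int) : String :=
  if 0 ≤ node ∧ node ≤ 38 then pvScanB node pvStartsB else "no_bucket"

-- ===== PRECONDITION & SPEC =====
def Spec_find_node_in_bucket (node : Int) (out : String) : Prop := out = find_node_in_bucket_alt node
instance (node : Int) (out : String) : Decidable (Spec_find_node_in_bucket node out) := by unfold Spec_find_node_in_bucket; infer_instance

-- ===== CLAIM (what is proved, stated in full; the proofs are below) =====
def Claim_equal_find_node_in_bucket : Prop := ∀ (node : Int), Dom_find_node_in_bucket node → Spec_find_node_in_bucket node (find_node_in_bucket node)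

-- ===== LEMMAS AND PROOFS =====
lemma findA_out (node : Int) (h : node < 0 ∨ 38 < node) : find_node_in_bucket node = "no_bucket" := by
  simp only [find_node_in_bucket, pvBucketsA, pvScanA, List.contains_eq_mem, List.mem_cons,
    List.not_mem_nil, or_false, decide_eq_true_eq]
  split_ifs <;> first | rfl | omega

-- ===== VERDICT (by name: the statement is the Claim_ definition above) =====
theorem find_node_in_bucket_spec : Claim_equal_find_node_in_bucket := by
  intro node _
  unfold Spec_find_node_in_bucket
  by_cases h : 0 ≤ node ∧ node ≤ 38
  · obtain ⟨h0, h38⟩ := h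
    interval_cases node <;> rfl
  · rw [findA_out node (by omega), find_node_in_bucket_alt, if_neg h]
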